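-- pv_equiv track=rewrite | github.com/adriendubois10/projet_TIPE | 2-Code/anim2D/gencarbones2D.py | tri_ind
-- ===== SOURCE A (Python) =====
-- def indmaxparmi(l, lt, n):
--     m = max([l[i] for i in range(n) if not lt[i]])
--     for i in range(n):
--         if l[i]==m and not lt[i]:
--             return i
--
-- def tri_ind(l):
--     n = len(l)
--     lt = [False for _ in range(n)]
--     lp = []
--     while False in lt:
--         im = indmaxparmi(l, lt, n)
--         lt[im] = True
--         lp.append(im)
--     return lp
-- ===== SOURCE B (Python) =====
-- def tri_ind(l):
--     # one stable sort of the indices instead of repeated full-list rescans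
--     return sorted(range(len(l)), key=lambda i: (-l[i], i))
-- ===== Notes on version B (the rewrite author's own statement) =====
-- stated objective: faster
-- what changed: Replaces the selection loop (find the max among untaken each round, O(n) scans plus an O(n) 'False in lt' test per round) by a single sort of the indices with key (-l[i], i), whose index tie-breaker reproduces A's first-max selection.
import Mathlib
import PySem

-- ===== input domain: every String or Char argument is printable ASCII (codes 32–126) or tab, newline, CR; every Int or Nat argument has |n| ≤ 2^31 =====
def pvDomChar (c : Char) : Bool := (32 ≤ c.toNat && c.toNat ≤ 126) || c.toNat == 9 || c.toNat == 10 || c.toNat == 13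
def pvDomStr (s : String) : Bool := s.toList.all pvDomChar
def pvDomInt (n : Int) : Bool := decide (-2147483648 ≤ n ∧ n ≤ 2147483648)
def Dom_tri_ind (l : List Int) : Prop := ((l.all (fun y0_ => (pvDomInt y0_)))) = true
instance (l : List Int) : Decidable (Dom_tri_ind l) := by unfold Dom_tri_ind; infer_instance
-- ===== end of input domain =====

-- B replaces A's repeated select-the-max-among-untaken scans by one stable sort of the
-- indices with key (-l[i], i) (objective: faster, O(n log n) vs O(n^2)).

-- ===== PORT A =====
-- max([l[i] for i in range(n) if not lt[i]]) then first i with l[i]==m and not lt[i]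
def indmaxparmi (l : List Int) (lt : List Bool) (n : Int) : Option Int :=
  let cand := (PySem.List.pyRange 0 n 1).foldl
    (fun acc i => if !(PySem.List.pyGetD lt i true) then acc ++ [PySem.List.pyGetD l i 0] else acc) []
  match PySem.List.max? cand (fun x => x) with
  | none => none  -- empty candidate list: Python's max raises ValueError (unreachable from tri_ind)
  | some m =>
    (PySem.List.pyRange 0 n 1).find?
      (fun i => PySem.List.pyGetD l i 0 == m && !(PySem.List.pyGetD lt i true))

-- the 'while False in lt' loop; each pass marks one index, so n passes suffice (fuel = n)
def triLoop (l : List Int) : Nat → List Bool → List Int → List Int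
  | 0, _, lp => lp
  | fuel+1, lt, lp =>
    if lt.contains false then
      match indmaxparmi l lt (PySem.List.len l) with
      | some im => triLoop l fuel (PySem.List.pySetD lt im true) (lp ++ [im])
      | none => lp  -- unreachable: False ∈ lt guarantees a candidate
    else lp

def tri_ind (l : List Int) : List Int :=
  triLoop l l.length (List.replicate l.length false) []

-- ===== PORT B =====
-- sorted(range(len(l)), key=lambda i: (-l[i], i))
def tri_ind_alt (l : List Int) : List Int :=
  PySem.List.sorted2 (PySem.List.pyRange 0 (PySem.List.len l) 1)
    (fun i => -(PySem.List.pyGetD l i 0)) (fun i => i) false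

-- ===== PRECONDITION & SPEC =====
def Spec_tri_ind (l : List Int) (out : List Int) : Prop := out = tri_ind_alt l
instance (l : List Int) (out : List Int) : Decidable (Spec_tri_ind l out) := by unfold Spec_tri_ind; infer_instance

-- ===== CLAIM (what is proved, stated in full; the proofs are below) =====
def Claim_equal_tri_ind : Prop := ∀ (l : List Int), Dom_tri_ind l → Spec_tri_ind l (tri_ind l)

-- ===== LEMMAS AND PROOFS =====

-- the lexicographic key B sorts by
def keyL (l : List Int) (i : Int) : Lex (Int × Int) := toLex (-(PySem.List.pyGetD l i 0), i)

-- the indices not yet taken, in increasing order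
def rem (l : List Int) (lt : List Bool) : List Int :=
  (PySem.List.pyRange 0 (l.length : Int) 1).filter (fun i => !(PySem.List.pyGetD lt i true))

-- sorted2 with two Int keys is sorted by the lexicographic key
lemma sorted2_lex (xs : List Int) (k1 k2 : Int → Int) :
    PySem.List.sorted2 xs k1 k2 false
      = PySem.List.sorted xs (fun i => toLex (k1 i, k2 i)) false := by
  have hb : (fun (a b : Int) => decide (k1 a < k1 b) || (!decide (k1 b < k1 a) && decide (k2 a < k2 b)))
      = (fun (a b : Int) => decide ((fun i => toLex (k1 i, k2 i)) a < (fun i => toLex (k1 i, k2 i)) b)) := by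
    funext a b
    by_cases h1 : k1 a < k1 b
    · simp [Prod.Lex.lt_iff, h1]
    · by_cases h2 : k1 b < k1 a
      · have hn : ¬ (toLex (k1 a, k2 a) < toLex (k1 b, k2 b)) := by
          rw [Prod.Lex.lt_iff]
          rintro (h | ⟨he, -⟩)
          · exact h1 h
          · exact absurd he (ne_of_gt h2)
        simp [h1, h2, hn]
      · have he : k1 a = k1 b := le_antisymm (not_lt.1 h2) (not_lt.1 h1)
        simp [Prod.Lex.lt_iff, he]
  simp only [PySem.List.sorted2, PySem.List.sorted]
  rw [hb]
  rfl

lemma mem_rem_iff (l : List Int) (lt : List Bool) (i : Int) :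
    i ∈ rem l lt ↔ (0 ≤ i ∧ i < (l.length : Int)) ∧ PySem.List.pyGetD lt i true = false := by
  simp [rem, List.mem_filter, PySem.List.mem_pyRange_one]

lemma rem_nodup (l : List Int) (lt : List Bool) : (rem l lt).Nodup :=
  (PySem.List.nodup_pyRange_one _ _).filter _

lemma contains_false_iff (l : List Int) (lt : List Bool) (hlen : lt.length = l.length) :
    lt.contains false = true ↔ rem l lt ≠ [] := by
  rw [List.contains_iff_mem]
  constructor
  · intro hmem
    obtain ⟨k, hk, hget⟩ := List.mem_iff_getElem.1 hmem
    have : (k : Int) ∈ rem l lt := by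
      rw [mem_rem_iff]
      refine ⟨⟨by positivity, by exact_mod_cast hlen ▸ hk⟩, ?_⟩
      rw [PySem.List.pyGetD_natCast, List.getD_eq_getElem _ _ hk, hget]
    intro hnil; rw [hnil] at this; exact absurd this (List.not_mem_nil)
  · intro hne
    obtain ⟨i, hi⟩ := List.exists_mem_of_ne_nil _ hne
    obtain ⟨⟨h0, h1⟩, hget⟩ := (mem_rem_iff l lt i).1 hi
    have h1' : i < (lt.length : Int) := by rw [hlen]; exact h1
    have := PySem.List.pyGetD_eq_getElem lt (i := i) true h0 h1'
    rw [this] at hget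
    exact hget ▸ List.getElem_mem _

lemma indmax_spec (l : List Int) (lt : List Bool) (h : rem l lt ≠ []) :
    ∃ im, indmaxparmi l lt l.length = some im ∧ im ∈ rem l lt ∧
      ∀ j ∈ rem l lt, j ≠ im → keyL l im < keyL l j := by
  have hcand : ((PySem.List.pyRange 0 (l.length : Int) 1).foldl
      (fun acc i => if !(PySem.List.pyGetD lt i true) then acc ++ [PySem.List.pyGetD l i 0] else acc) [])
      = (rem l lt).map (fun i => PySem.List.pyGetD l i 0) := by
    rw [PySem.List.foldl_append_if]; simp [rem]
  rcases hm : PySem.List.max? ((rem l lt).map (fun i => PySem.List.pyGetD l i 0)) (fun x => x) with _ | m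
  · rw [PySem.List.max?_eq_none_iff] at hm
    exact absurd (List.map_eq_nil_iff.1 hm) h
  have hmax : ∀ j ∈ rem l lt, PySem.List.pyGetD l j 0 ≤ m := by
    intro j hj
    exact PySem.List.max?_isMax hm _ (List.mem_map_of_mem hj)
  obtain ⟨i₀, hi₀, hv₀⟩ := List.mem_map.1 (PySem.List.max?_mem hm)
  have hq₀ : (PySem.List.pyGetD l i₀ 0 == m && !(PySem.List.pyGetD lt i₀ true)) = true := by
    obtain ⟨_, hu⟩ := (mem_rem_iff l lt i₀).1 hi₀
    simp [hv₀, hu]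
  rcases hf : List.find? (fun i => PySem.List.pyGetD l i 0 == m && !(PySem.List.pyGetD lt i true))
      (PySem.List.pyRange 0 (l.length : Int) 1) with _ | im
  · rw [List.find?_eq_none] at hf
    exact absurd hq₀ (by simpa using hf i₀ (List.mem_of_mem_filter hi₀))
  obtain ⟨hqim, as, bs, hsplit, has⟩ := List.find?_eq_some_iff_append.1 hf
  refine ⟨im, ?_, ?_, ?_⟩
  · show indmaxparmi l lt ((l.length : Nat) : Int) = some im
    simp only [indmaxparmi]
    rw [hcand, hm]
    exact hf
  · have him : im ∈ PySem.List.pyRange 0 (l.length : Int) 1 := by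
      rw [hsplit]; exact List.mem_append_right _ (List.mem_cons_self)
    rw [mem_rem_iff]
    obtain ⟨hvm, hu⟩ : PySem.List.pyGetD l im 0 = m ∧ PySem.List.pyGetD lt im true = false := by
      simpa using hqim
    exact ⟨PySem.List.mem_pyRange_one.1 him, hu⟩
  · intro j hj hne
    obtain ⟨hvm, _⟩ : PySem.List.pyGetD l im 0 = m ∧ PySem.List.pyGetD lt im true = false := by
      simpa using hqim
    have hvj := hmax j hj
    rcases lt_or_eq_of_le hvj with hlt | heq
    · -- strictly smaller value: first lex component decides
      rw [keyL, keyL, Prod.Lex.lt_iff]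
      left
      simpa [hvm] using neg_lt_neg hlt
    · -- equal value: j also satisfies the find? predicate, so it sits after im
      have hqj : (PySem.List.pyGetD l j 0 == m && !(PySem.List.pyGetD lt j true)) = true := by
        obtain ⟨_, hu⟩ := (mem_rem_iff l lt j).1 hj
        simp [heq, hu]
      have hjrange : j ∈ PySem.List.pyRange 0 (l.length : Int) 1 := List.mem_of_mem_filter hj
      rw [hsplit, List.mem_append, List.mem_cons] at hjrange
      have hjbs : j ∈ bs := by
        rcases hjrange with hja | hj' | hjb
        · have := has j hja
          simp only [Bool.not_eq_eq_eq_not, Bool.not_true, Bool.and_eq_false_iff] at this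
          simp only [Bool.and_eq_true, beq_iff_eq, Bool.not_eq_eq_eq_not, Bool.not_true] at hqj
          rcases this with h' | h'
          · exact absurd hqj.1 (by simpa using h')
          · rw [hqj.2] at h'; exact absurd h' (by simp)
        · exact absurd hj' hne
        · exact hjb
      have hpw := PySem.List.pairwise_lt_pyRange_one 0 (l.length : Int)
      rw [hsplit] at hpw
      have himj : im < j :=
        (List.pairwise_cons.1 (List.pairwise_append.1 hpw).2.1).1 j hjbs
      rw [keyL, keyL, Prod.Lex.lt_iff]
      right
      exact ⟨by simp [hvm, heq], himj⟩

lemma rem_set (l : List Int) (lt : List Bool) (hlen : lt.length = l.length)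
    (im : Int) (him : im ∈ rem l lt) :
    rem l (PySem.List.pySetD lt im true) = (rem l lt).erase im := by
  obtain ⟨⟨h0, h1⟩, _⟩ := (mem_rem_iff l lt im).1 him
  rw [(rem_nodup l lt).erase_eq_filter, rem, rem, List.filter_filter]
  apply List.filter_congr
  intro i hi
  obtain ⟨hi0, hi1⟩ := PySem.List.mem_pyRange_one.1 hi
  have hset : PySem.List.pyGetD (PySem.List.pySetD lt im true) i true
      = if i = im then true else PySem.List.pyGetD lt i true := by
    rw [PySem.List.pySetD_of_nonneg lt true h0,
        PySem.List.pyGetD_eq_getElem _ true hi0 (by rw [List.length_set, hlen]; exact hi1),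
        List.getElem_set,
        PySem.List.pyGetD_eq_getElem lt true hi0 (by rw [hlen]; exact hi1)]
    by_cases hii : i = im
    · simp [hii]
    · rw [if_neg hii, if_neg (show ¬ im.toNat = i.toNat by omega)]
  rw [hset]
  by_cases hii : i = im <;> simp [hii]

lemma triLoop_spec (l : List Int) : ∀ (fuel : Nat) (lt : List Bool) (lp : List Int),
    lt.length = l.length → (rem l lt).length ≤ fuel →
    ∃ out, triLoop l fuel lt lp = lp ++ out ∧ out.Perm (rem l lt) ∧
      out.Pairwise (fun a b => keyL l a < keyL l b) := by
  intro fuel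
  induction fuel with
  | zero =>
    intro lt lp hlen hle
    have : rem l lt = [] := List.length_eq_zero_iff.1 (Nat.le_zero.1 hle)
    exact ⟨[], by simp [triLoop], by simp [this], List.Pairwise.nil⟩
  | succ fuel ih =>
    intro lt lp hlen hle
    by_cases hc : lt.contains false
    · have hne : rem l lt ≠ [] := (contains_false_iff l lt hlen).1 hc
      obtain ⟨im, hfind, him, hmin⟩ := indmax_spec l lt hne
      have hrem' := rem_set l lt hlen im him
      have hlen' : (PySem.List.pySetD lt im true).length = l.length := by
        rw [PySem.List.length_pySetD]; exact hlen
      have hle' : (rem l (PySem.List.pySetD lt im true)).length ≤ fuel := by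
        rw [hrem', List.length_erase_of_mem him]
        have : 1 ≤ (rem l lt).length := List.length_pos_of_ne_nil hne
        omega
      obtain ⟨out', hrun', hperm', hpw'⟩ := ih (PySem.List.pySetD lt im true) (lp ++ [im]) hlen' hle'
      refine ⟨im :: out', ?_, ?_, ?_⟩
      · show triLoop l (fuel + 1) lt lp = lp ++ im :: out'
        rw [triLoop, if_pos hc]
        have hl : PySem.List.len l = ((l.length : Nat) : Int) := rfl
        rw [hl, hfind]
        show triLoop l fuel (PySem.List.pySetD lt im true) (lp ++ [im]) = lp ++ im :: out'
        rw [hrun', List.append_assoc]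
        rfl
      · rw [hrem'] at hperm'
        exact ((hperm'.cons im).trans (List.perm_cons_erase him).symm)
      · rw [List.pairwise_cons]
        refine ⟨?_, hpw'⟩
        intro b hb
        have hbrem : b ∈ (rem l lt).erase im := by
          rw [← hrem']; exact hperm'.mem_iff.1 hb
        obtain ⟨hbne, hbmem⟩ := (rem_nodup l lt).mem_erase_iff.1 hbrem
        exact hmin b hbmem hbne
    · refine ⟨[], ?_, ?_, List.Pairwise.nil⟩
      · show triLoop l (fuel + 1) lt lp = lp ++ []
        rw [triLoop, if_neg hc, List.append_nil]
      · have : rem l lt = [] := by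
          by_contra hne
          exact hc ((contains_false_iff l lt hlen).2 hne)
        simp [this]

-- ===== VERDICT (by name: the statement is the Claim_ definition above) =====
theorem tri_ind_spec : Claim_equal_tri_ind := by
  intro l _
  unfold Spec_tri_ind
  have hrem : rem l (List.replicate l.length false) = PySem.List.pyRange 0 (l.length : Int) 1 := by
    rw [rem]
    apply List.filter_eq_self.mpr
    intro i hi
    obtain ⟨h0, h1⟩ := PySem.List.mem_pyRange_one.1 hi
    rw [PySem.List.pyGetD_eq_getElem _ true h0 (by simpa using h1)]
    simp
  obtain ⟨out, hrun, hperm, hpw⟩ :=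
    triLoop_spec l l.length (List.replicate l.length false) []
      (by simp) (by rw [hrem, PySem.List.pyRange_zero_natCast]; simp)
  rw [tri_ind_alt, sorted2_lex]
  show tri_ind l = PySem.List.sorted _ (keyL l) false
  rw [tri_ind, hrun, List.nil_append]
  have : (PySem.List.len l) = (l.length : Int) := rfl
  rw [this]
  exact (PySem.List.sorted_eq_of_perm_of_pairwise_lt _ _ _ (hrem ▸ hperm) hpw).symm
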